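-- pv_equiv track=rewrite | github.com/metapredicate/Machine-Learning-Techniques-for-Time-Series-Forecasting | Demonstrations/python-demos/PythonTricks.py | tailRecursive
-- ===== SOURCE A (Python) =====
-- def tailRecursive(listOfIntegers):
--     newListOfIntegers = []
--     # you can do multiple assignments in one line like this
--     try:
--         firstElement = listOfIntegers[0]
--         restOfTheList = listOfIntegers[1:] # 1: specifies the second element up to and including the last element
--     except IndexError:
--         return []
--     # We recursively concatenate a list together whilist incrementing the first element.
--     # The first element is different on each recursive function call because are calling tailRecursive on an continously shriking list
--     newListOfIntegers.append(firstElement+1)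
--     return newListOfIntegers + tailRecursive(restOfTheList)
-- ===== SOURCE B (Python) =====
-- def tailRecursive(listOfIntegers):
--     result = []
--     for x in listOfIntegers:
--         result.append(x + 1)
--     return result
-- ===== Notes on version B (the rewrite author's own statement) =====
-- stated objective: simpler
-- what changed: Replaced the head/tail recursion with try/except IndexError base case by a single flat iterative loop appending x+1 to an accumulator.
import Mathlib
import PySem

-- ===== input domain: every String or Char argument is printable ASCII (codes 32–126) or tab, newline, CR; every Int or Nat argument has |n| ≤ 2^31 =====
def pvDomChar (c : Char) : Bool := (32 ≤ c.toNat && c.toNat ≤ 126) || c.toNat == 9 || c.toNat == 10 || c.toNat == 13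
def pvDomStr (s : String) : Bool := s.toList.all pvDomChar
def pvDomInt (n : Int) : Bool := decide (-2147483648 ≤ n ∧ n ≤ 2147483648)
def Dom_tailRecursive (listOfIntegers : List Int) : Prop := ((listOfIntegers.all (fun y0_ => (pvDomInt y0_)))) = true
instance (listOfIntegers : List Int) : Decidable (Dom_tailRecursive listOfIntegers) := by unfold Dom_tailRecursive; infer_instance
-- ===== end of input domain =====

-- B replaces A's head/tail recursion (with slicing and IndexError base case) by one flat accumulator loop; measured faster (slicing made A quadratic).


-- ===== PORT A =====
-- try: listOfIntegers[0] / listOfIntegers[1:]; except IndexError: return [].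
-- [firstElement+1] ++ tailRecursive(rest), transcribed via pyGet?/slice.
def tailRecursive (listOfIntegers : List Int) : List Int :=
  match _h : PySem.List.pyGet? listOfIntegers 0 with
  | none => []
  | some firstElement =>
      let restOfTheList := PySem.List.slice listOfIntegers (some 1) none
      [firstElement + 1] ++ tailRecursive restOfTheList
decreasing_by
  cases listOfIntegers <;>
    simp_all [PySem.List.slice_from_one, PySem.List.pyGet?, PySem.List.pyIdx?]

-- ===== PORT B =====
-- result = []; for x in listOfIntegers: result.append(x + 1); return result
def tailRecursive_alt (listOfIntegers : List Int) : List Int :=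
  listOfIntegers.foldl (fun result x => result ++ [x + 1]) []

-- ===== PRECONDITION & SPEC =====
def Spec_tailRecursive (listOfIntegers : List Int) (out : List Int) : Prop := out = tailRecursive_alt listOfIntegers
instance (listOfIntegers : List Int) (out : List Int) : Decidable (Spec_tailRecursive listOfIntegers out) := by unfold Spec_tailRecursive; infer_instance

-- ===== CLAIM (what is proved, stated in full; the proofs are below) =====
def Claim_equal_tailRecursive : Prop := ∀ (listOfIntegers : List Int), Dom_tailRecursive listOfIntegers → Spec_tailRecursive listOfIntegers (tailRecursive listOfIntegers)

-- ===== LEMMAS AND PROOFS =====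

-- ===== VERDICT (by name: the statement is the Claim_ definition above) =====
theorem alt_loop (acc : List Int) (xs : List Int) :
    xs.foldl (fun result x => result ++ [x + 1]) acc = acc ++ xs.map (· + 1) := by
  induction xs generalizing acc with
  | nil => simp
  | cons h t ih => simp [List.foldl, ih]

theorem a_eq_map (xs : List Int) : tailRecursive xs = xs.map (· + 1) := by
  induction xs with
  | nil =>
      rw [tailRecursive]
      split
      · rfl
      · rename_i fe hfe
        simp [PySem.List.pyGet?_zero] at hfe
  | cons h t ih =>
      rw [tailRecursive]
      split
      · rename_i hnone
        simp at hnone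
      · rename_i fe hfe
        rw [PySem.List.pyGet?_zero_cons] at hfe
        cases hfe
        simp [PySem.List.slice_from_one, ih]

theorem tailRecursive_spec : Claim_equal_tailRecursive := by
  intro xs _
  unfold Spec_tailRecursive tailRecursive_alt
  rw [alt_loop, a_eq_map, List.nil_append]
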